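-- pv_equiv track=rewrite | github.com/ClaudioJuniorLanza/ia-eccomerce-assistant | ia_assistant/interface/cli.py | _extract_essential_adr_content
-- ===== SOURCE A (Python) =====
-- def _extract_essential_adr_content(content: str) -> str:
--     """
--     Extrai o conteúdo essencial de um ADR, removendo partes menos relevantes
--     para reduzir o número de tokens.
--
--     Args:
--         content: Conteúdo completo do ADR.
--
--     Returns:
--         Conteúdo essencial do ADR.
--     """
--     # Divide o conteúdo em seções
--     sections = []
--     current_section = []
--     current_heading = ""
--
--     for line in content.split("\n"):
--         # Detecta cabeçalhos de seção
--         if line.startswith("# "):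
--             # Se já temos uma seção, adiciona à lista
--             if current_heading and current_section:
--                 sections.append({
--                     "heading": current_heading,
--                     "content": "\n".join(current_section),
--                     "priority": 1  # Prioridade padrão
--                 })
--
--             # Inicia nova seção
--             current_heading = line
--             current_section = []
--         elif line.startswith("## "):
--             # Se já temos uma seção, adiciona à lista
--             if current_heading and current_section:
--                 sections.append({
--                     "heading": current_heading,
--                     "content": "\n".join(current_section),
--                     "priority": 1  # Prioridade padrão
--                 })
--
--             # Inicia nova seção
--             current_heading = line
--             current_section = []
--         else:
--             # Adiciona linha à seção atual
--             current_section.append(line)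
--
--     # Adiciona a última seção
--     if current_heading and current_section:
--         sections.append({
--             "heading": current_heading,
--             "content": "\n".join(current_section),
--             "priority": 1  # Prioridade padrão
--         })
--
--     # Define prioridades para diferentes tipos de seções
--     for section in sections:
--         heading_lower = section["heading"].lower()
--
--         # Título principal tem prioridade máxima
--         if "# adr" in heading_lower:
--             section["priority"] = 10
--         # Seções importantes têm prioridade alta
--         elif any(keyword in heading_lower for keyword in ["status", "contexto", "decisão", "consequências", "alternativas"]):
--             section["priority"] = 9
--         # Seções de detalhes têm prioridade média
--         elif any(keyword in heading_lower for keyword in ["detalhes", "implementação", "referências"]):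
--             section["priority"] = 5
--         # Outras seções têm prioridade baixa
--         else:
--             section["priority"] = 1
--
--     # Ordena as seções por prioridade
--     sections.sort(key=lambda x: x["priority"], reverse=True)
--
--     # Monta o conteúdo essencial
--     essential_content = []
--     for section in sections:
--         essential_content.append(section["heading"])
--         essential_content.append(section["content"])
--
--     return "\n".join(essential_content)
-- ===== SOURCE B (Python) =====
-- def _extract_essential_adr_content(content: str) -> str:
--     """Bucket sections by fixed priority keys instead of sorting; single merged header branch."""
--     buckets = {10: [], 9: [], 5: [], 1: []}
--
--     def emit(heading, lines):
--         hl = heading.lower()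
--         if "# adr" in hl:
--             p = 10
--         elif any(k in hl for k in ("status", "contexto", "decisão", "consequências", "alternativas")):
--             p = 9
--         elif any(k in hl for k in ("detalhes", "implementação", "referências")):
--             p = 5
--         else:
--             p = 1
--         buckets[p].append(heading)
--         buckets[p].append("\n".join(lines))
--
--     heading, lines = "", []
--     for line in content.split("\n"):
--         if line.startswith("# ") or line.startswith("## "):
--             if heading and lines:
--                 emit(heading, lines)
--             heading, lines = line, []
--         else:
--             lines.append(line)
--     if heading and lines:
--         emit(heading, lines)
--
--     return "\n".join(buckets[10] + buckets[9] + buckets[5] + buckets[1])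
-- ===== Notes on version B (the rewrite author's own statement) =====
-- stated objective: alternative
-- what changed: Replaces A's build-sections-then-prioritize-then-stable-sort pipeline with a single merged header branch that assigns each section at emit time into a dict of four fixed priority buckets (10/9/5/1), reassembled by concatenating the buckets in fixed order, so no sort is performed.
import Mathlib
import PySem

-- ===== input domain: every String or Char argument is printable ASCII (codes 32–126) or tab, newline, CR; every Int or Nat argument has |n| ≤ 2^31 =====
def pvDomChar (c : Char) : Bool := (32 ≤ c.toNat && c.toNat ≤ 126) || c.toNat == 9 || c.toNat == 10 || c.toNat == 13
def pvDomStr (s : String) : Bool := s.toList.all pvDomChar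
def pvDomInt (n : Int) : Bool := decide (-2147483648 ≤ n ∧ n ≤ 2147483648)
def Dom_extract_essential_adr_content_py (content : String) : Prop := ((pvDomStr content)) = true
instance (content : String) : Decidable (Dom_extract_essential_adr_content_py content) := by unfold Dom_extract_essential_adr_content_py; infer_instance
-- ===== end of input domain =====

-- B replaces A's parse/prioritize/stable-sort pipeline with fixed-priority dict buckets
-- (10/9/5/1) filled in one pass and concatenated in fixed order (objective: alternative).
-- ===== PORT A =====
-- helper: the priority if-chain of A's second loop (transcribed verbatim)
def pvPrioA (heading : String) : Int :=
  let heading_lower := PySem.Str.lower heading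
  if PySem.Str.isIn "# adr" heading_lower then 10
  else if ["status", "contexto", "decisão", "consequências", "alternativas"].any
      (fun keyword => PySem.Str.isIn keyword heading_lower) then 9
  else if ["detalhes", "implementação", "referências"].any
      (fun keyword => PySem.Str.isIn keyword heading_lower) then 5
  else 1

-- state: (sections, current_section, current_heading)
def pvAStep (st : List (String × String × Int) × List String × String) (line : String) :
    List (String × String × Int) × List String × String :=
  let (sections, current_section, current_heading) := st
  if PySem.Str.startswith line "# " then
    (if current_heading ≠ "" ∧ current_section ≠ [] then
        sections ++ [(current_heading, PySem.Str.join "\n" current_section, 1)]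
      else sections, [], line)
  else if PySem.Str.startswith line "## " then
    (if current_heading ≠ "" ∧ current_section ≠ [] then
        sections ++ [(current_heading, PySem.Str.join "\n" current_section, 1)]
      else sections, [], line)
  else (sections, current_section ++ [line], current_heading)

def extract_essential_adr_content_py (content : String) : String :=
  let st := ((PySem.Str.split? content "\n").getD []).foldl pvAStep ([], [], "")
  let sections :=
    if st.2.2 ≠ "" ∧ st.2.1 ≠ [] then
      st.1 ++ [(st.2.2, PySem.Str.join "\n" st.2.1, 1)]
    else st.1
  let sections2 := sections.map (fun sec => (sec.1, sec.2.1, pvPrioA sec.1))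
  let sorted := PySem.List.sorted sections2 (fun x => x.2.2) true
  let essential_content := sorted.foldl (fun acc sec => acc ++ [sec.1, sec.2.1]) []
  PySem.Str.join "\n" essential_content

-- ===== PORT B =====
-- Source B's emit: compute the bucket key, append heading then joined content to that bucket
def pvBEmit (buckets : PySem.Dict Int (List String)) (heading : String) (lines : List String) :
    PySem.Dict Int (List String) :=
  let hl := PySem.Str.lower heading
  let p : Int :=
    if PySem.Str.isIn "# adr" hl then 10
    else if ["status", "contexto", "decisão", "consequências", "alternativas"].any
        (fun k => PySem.Str.isIn k hl) then 9
    else if ["detalhes", "implementação", "referências"].any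
        (fun k => PySem.Str.isIn k hl) then 5
    else 1
  let b := buckets.modify p [] (fun l => l ++ [heading])
  b.modify p [] (fun l => l ++ [PySem.Str.join "\n" lines])

-- state: (buckets, heading, lines)
def pvBStep (st : PySem.Dict Int (List String) × String × List String) (line : String) :
    PySem.Dict Int (List String) × String × List String :=
  let (buckets, heading, lines) := st
  if PySem.Str.startswith line "# " || PySem.Str.startswith line "## " then
    (if heading ≠ "" ∧ lines ≠ [] then pvBEmit buckets heading lines else buckets, line, [])
  else (buckets, heading, lines ++ [line])

def pvBucketsInit : PySem.Dict Int (List String) :=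
  ((((PySem.Dict.mk []).insert 10 []).insert 9 []).insert 5 []).insert 1 []

def extract_essential_adr_content_py_alt (content : String) : String :=
  let st := ((PySem.Str.split? content "\n").getD []).foldl pvBStep (pvBucketsInit, "", [])
  let buckets := if st.2.1 ≠ "" ∧ st.2.2 ≠ [] then pvBEmit st.1 st.2.1 st.2.2 else st.1
  PySem.Str.join "\n"
    (buckets.getD 10 [] ++ buckets.getD 9 [] ++ buckets.getD 5 [] ++ buckets.getD 1 [])

-- ===== PRECONDITION & SPEC =====
def Spec_extract_essential_adr_content_py (content : String) (out : String) : Prop := out = extract_essential_adr_content_py_alt content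
instance (content : String) (out : String) : Decidable (Spec_extract_essential_adr_content_py content out) := by unfold Spec_extract_essential_adr_content_py; infer_instance

-- ===== CLAIM (what is proved, stated in full; the proofs are below) =====
def Claim_equal_extract_essential_adr_content_py : Prop := ∀ (content : String), Dom_extract_essential_adr_content_py content → Spec_extract_essential_adr_content_py content (extract_essential_adr_content_py content)

-- ===== LEMMAS AND PROOFS =====

-- the flat bucket of priority k extracted from A's section list
def pvF (k : Int) (secs : List (String × String × Int)) : List String :=
  (secs.filter (fun s => pvPrioA s.1 == k)).flatMap (fun s => [s.1, s.2.1])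

-- B's bucket dict, expressed from A's section list
def pvDictOf (secs : List (String × String × Int)) : PySem.Dict Int (List String) :=
  PySem.Dict.mk [(10, pvF 10 secs), (9, pvF 9 secs), (5, pvF 5 secs), (1, pvF 1 secs)]

lemma pvPrioA_cases (h : String) :
    pvPrioA h = 10 ∨ pvPrioA h = 9 ∨ pvPrioA h = 5 ∨ pvPrioA h = 1 := by
  unfold pvPrioA; dsimp only; split_ifs <;> simp

lemma pvF_append (k : Int) (secs : List (String × String × Int)) (s : String × String × Int) :
    pvF k (secs ++ [s]) =
      pvF k secs ++ (if pvPrioA s.1 = k then [s.1, s.2.1] else []) := by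
  simp [pvF, List.filter_append]
  split_ifs <;> simp_all

lemma pvBEmit_dictOf (secs : List (String × String × Int)) (h : String) (cur : List String) :
    pvBEmit (pvDictOf secs) h cur = pvDictOf (secs ++ [(h, PySem.Str.join "\n" cur, 1)]) := by
  have e : pvBEmit (pvDictOf secs) h cur =
      ((pvDictOf secs).modify (pvPrioA h) [] (fun l => l ++ [h])).modify (pvPrioA h) []
        (fun l => l ++ [PySem.Str.join "\n" cur]) := rfl
  rw [e]
  rcases pvPrioA_cases h with hp | hp | hp | hp <;>
    rw [hp] <;>
    simp [pvDictOf, PySem.Dict.modify, PySem.Dict.insert, PySem.Dict.getD, PySem.Dict.get?,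
      PySem.Dict.contains, pvF_append, hp]

lemma pvFold_eq (ls : List String) (secs : List (String × String × Int)) (cur : List String)
    (h : String) :
    ls.foldl pvBStep (pvDictOf secs, h, cur) =
      (pvDictOf (ls.foldl pvAStep (secs, cur, h)).1,
       (ls.foldl pvAStep (secs, cur, h)).2.2,
       (ls.foldl pvAStep (secs, cur, h)).2.1) := by
  induction ls generalizing secs cur h with
  | nil => rfl
  | cons line rest ih =>
    simp only [List.foldl_cons]
    by_cases h1 : PySem.Str.startswith line "# " <;>
      by_cases h2 : PySem.Str.startswith line "## " <;>
        simp only [pvAStep, pvBStep, h1, h2, Bool.or_self, Bool.true_or, Bool.or_true,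
            ite_true] <;>
          (try split_ifs with hc) <;>
          first
            | (rw [pvBEmit_dictOf]; exact ih _ _ _)
            | exact ih _ _ _

lemma pvInsertBy_cons (before : α → α → Bool) (x y : α) (ys : List α) :
    PySem.List.insertBy before x (y :: ys) =
      if before x y then x :: y :: ys else y :: PySem.List.insertBy before x ys := by
  simp [PySem.List.insertBy]

lemma pvInsertBy_append (before : α → α → Bool) (x : α) (A B : List α)
    (hA : ∀ a ∈ A, before x a = false) (hB : ∀ b ∈ B.head?, before x b = true) :
    PySem.List.insertBy before x (A ++ B) = A ++ x :: B := by
  induction A with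
  | nil =>
    cases B with
    | nil => simp [PySem.List.insertBy]
    | cons b B' => simp [pvInsertBy_cons, hB b rfl]
  | cons a A' ih =>
    have ha : before x a = false := hA a (by simp)
    simp [pvInsertBy_cons, ha, ih (fun y hy => hA y (by simp [hy]))]

-- insert between the not-smaller prefix and the strictly-smaller suffix (reverse order)
lemma pvInsert_between {α : Type} (key : α → Int) (x : α) (L R : List α)
    (hL : ∀ a ∈ L, ¬(key a < key x)) (hR : ∀ b ∈ R, key b < key x) :
    PySem.List.insertBy (fun a b => decide (key b < key a)) x (L ++ R) = L ++ x :: R := by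
  apply pvInsertBy_append
  · intro a ha; simpa using hL a ha
  · intro b hb; simpa using hR b (List.mem_of_mem_head? hb)

-- the stable reverse-sort by a key ranging over {10,9,5,1} is the bucket concatenation
lemma pvSorted_buckets {α : Type} (xs : List α) (key : α → Int)
    (hk : ∀ x ∈ xs, key x = 10 ∨ key x = 9 ∨ key x = 5 ∨ key x = 1) :
    PySem.List.sorted xs key true =
      xs.filter (fun x => key x == 10) ++ xs.filter (fun x => key x == 9) ++
      xs.filter (fun x => key x == 5) ++ xs.filter (fun x => key x == 1) := by
  induction xs using List.reverseRecOn with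
  | nil => rfl
  | append_singleton ys x ih =>
    have hx := hk x (by simp)
    have hys : ∀ y ∈ ys, key y = 10 ∨ key y = 9 ∨ key y = 5 ∨ key y = 1 :=
      fun y hy => hk y (by simp [hy])
    have mk' : ∀ (k : Int) (y : α), y ∈ ys.filter (fun z => key z == k) → key y = k := by
      intro k y hy
      simpa using (List.mem_filter.mp hy).2
    rw [PySem.List.sorted_rev_eq_foldl_insertBy, List.foldl_append, List.foldl_cons,
      List.foldl_nil, ← PySem.List.sorted_rev_eq_foldl_insertBy, ih hys]
    simp only [List.filter_append, List.filter_cons, List.filter_nil]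
    set f10 := ys.filter (fun z => key z == 10) with hf10
    set f9 := ys.filter (fun z => key z == 9) with hf9
    set f5 := ys.filter (fun z => key z == 5) with hf5
    set f1 := ys.filter (fun z => key z == 1) with hf1
    rcases hx with hx | hx | hx | hx
    · have e := pvInsert_between key x f10 (f9 ++ f5 ++ f1)
        (by intro a ha; have := mk' _ _ ha; omega)
        (by intro b hb
            simp only [List.mem_append] at hb
            rcases hb with (hb | hb) | hb <;> (have := mk' _ _ hb; omega))
      simp only [hx, beq_iff_eq]
      rw [show f10 ++ f9 ++ f5 ++ f1 = f10 ++ (f9 ++ f5 ++ f1) by simp]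
      rw [e]; simp
    · have e := pvInsert_between key x (f10 ++ f9) (f5 ++ f1)
        (by intro a ha
            simp only [List.mem_append] at ha
            rcases ha with ha | ha <;> (have := mk' _ _ ha; omega))
        (by intro b hb
            simp only [List.mem_append] at hb
            rcases hb with hb | hb <;> (have := mk' _ _ hb; omega))
      simp only [hx, beq_iff_eq]
      rw [show f10 ++ f9 ++ f5 ++ f1 = (f10 ++ f9) ++ (f5 ++ f1) by simp]
      rw [e]; simp
    · have e := pvInsert_between key x (f10 ++ f9 ++ f5) f1
        (by intro a ha
            simp only [List.mem_append] at ha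
            rcases ha with (ha | ha) | ha <;> (have := mk' _ _ ha; omega))
        (by intro b hb; have := mk' _ _ hb; omega)
      simp only [hx, beq_iff_eq]
      rw [show f10 ++ f9 ++ f5 ++ f1 = (f10 ++ f9 ++ f5) ++ f1 by simp]
      rw [e]; simp
    · have e := pvInsert_between key x (f10 ++ f9 ++ f5 ++ f1) []
        (by intro a ha
            simp only [List.mem_append] at ha
            rcases ha with ((ha | ha) | ha) | ha <;> (have := mk' _ _ ha; omega))
        (by intro b hb; simp at hb)
      simp only [hx, beq_iff_eq]
      rw [show f10 ++ f9 ++ f5 ++ f1 = (f10 ++ f9 ++ f5 ++ f1) ++ [] by simp]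
      rw [e]; simp

-- the assembled output, computed from A's final section list, is B's bucket concatenation
lemma pvFinal (secs : List (String × String × Int)) :
    PySem.Str.join "\n"
      ((PySem.List.sorted (secs.map (fun sec => (sec.1, sec.2.1, pvPrioA sec.1)))
          (fun x => x.2.2) true).foldl (fun acc sec => acc ++ [sec.1, sec.2.1]) []) =
    PySem.Str.join "\n"
      ((pvDictOf secs).getD 10 [] ++ (pvDictOf secs).getD 9 [] ++
       (pvDictOf secs).getD 5 [] ++ (pvDictOf secs).getD 1 []) := by
  congr 1
  rw [pvSorted_buckets _ _ (by
    intro x hx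
    rcases List.mem_map.mp hx with ⟨s, _, rfl⟩
    exact pvPrioA_cases s.1)]
  rw [PySem.List.foldl_append_eq_flatMap
    (fun (sec : String × String × Int) => [sec.1, sec.2.1]) _ []]
  have hcomp : ∀ (k : Int),
      ((secs.map (fun sec => (sec.1, sec.2.1, pvPrioA sec.1))).filter
        (fun x => x.2.2 == k)).flatMap (fun sec => [sec.1, sec.2.1]) = pvF k secs := by
    intro k
    rw [List.filter_map, List.flatMap_map]
    rfl
  simp only [List.flatMap_append, List.nil_append, hcomp]
  rfl

theorem extract_essential_adr_content_py_spec : Claim_equal_extract_essential_adr_content_py := by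
  intro content _
  unfold Spec_extract_essential_adr_content_py extract_essential_adr_content_py
    extract_essential_adr_content_py_alt
  have hinit : pvBucketsInit = pvDictOf [] := rfl
  rw [hinit, pvFold_eq]
  dsimp only
  split_ifs with hc
  · rw [pvBEmit_dictOf]
    exact pvFinal _
  · exact pvFinal _
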